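-- pv_equiv track=rewrite | github.com/davidtala108/David-Coding-Projects- | Python/bears.py | bears
-- ===== SOURCE A (Python) =====
-- def bears(n: int) -> bool:
--     if n == str(n):
--         raise ValueError
--     if n == 42:
--         return True
--     t = n
--     if n % 5 == 0:
--         temp = n - 42
--         if temp >= 42:
--             n = temp
--     if n % 2 == 0:
--         temp = n//2
--         if temp >= 42:
--             n = temp
--     if n % 3 == 0 or n % 4 == 0:
--         x = str(n)
--         y = list(x)
--         z = int(y[-1])* int(y[-2])
--         temp = n - z
--         if temp >= 42:
--             n = temp
--     if n == t:
--         return False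
--     return bears(n)
-- ===== SOURCE B (Python) =====
-- def bears(n: int) -> bool:
--     # iterative version; digit product computed arithmetically instead of via str()
--     while True:
--         if n == 42:
--             return True
--         t = n
--         if n % 5 == 0 and n - 42 >= 42:
--             n = n - 42
--         if n % 2 == 0 and n // 2 >= 42:
--             n = n // 2
--         if n % 3 == 0 or n % 4 == 0:
--             z = (n % 10) * (n // 10 % 10)
--             if n - z >= 42:
--                 n = n - z
--         if n == t:
--             return False
-- ===== Notes on version B (the rewrite author's own statement) =====
-- stated objective: alternative
-- what changed: Tail recursion becomes a while loop and the product of the last two decimal digits is computed arithmetically (mod and floor division) instead of via str()/list()/int(), which also removes the dead 'n == str(n)' guard and the crashes on single-digit inputs.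
-- outside the precondition, e.g. on bears(3): A raises IndexError, B returns False; on bears(4): A raises IndexError, B returns False; on bears(-9): A raises ValueError, B returns False
import Mathlib
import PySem

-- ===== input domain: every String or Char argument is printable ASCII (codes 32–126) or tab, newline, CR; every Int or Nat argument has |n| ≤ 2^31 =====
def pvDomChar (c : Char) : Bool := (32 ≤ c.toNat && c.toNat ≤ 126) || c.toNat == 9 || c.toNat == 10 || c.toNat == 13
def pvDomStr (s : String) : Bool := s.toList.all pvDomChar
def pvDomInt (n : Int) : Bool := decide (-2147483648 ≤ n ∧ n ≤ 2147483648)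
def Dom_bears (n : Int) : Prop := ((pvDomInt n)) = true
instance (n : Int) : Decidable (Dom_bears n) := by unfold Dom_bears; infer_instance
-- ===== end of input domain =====

-- B rewrites A's tail recursion as a loop and computes the last-two-digit product arithmetically
-- instead of via str()/list()/int() (objective: alternative; equivalence is about the return value).

-- ===== PORT A =====
-- the digit-product branch body: z = int(y[-1]) * int(y[-2]); temp = n - z; if temp >= 42: n = temp
def bearsDigitA (n : Int) : Int :=
  let y := PySem.Int.toChars n                    -- x = str(n); y = list(x)
  match PySem.List.pyGet? y (-1), PySem.List.pyGet? y (-2) with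
  | some c1, some c2 =>
    match PySem.Int.ofChars? [c1], PySem.Int.ofChars? [c2] with
    | some d1, some d2 =>
      let z := d1 * d2
      let temp := n - z
      if 42 ≤ temp then temp else n
    | _, _ => n      -- Python raises ValueError in int() here; excluded by Pre_bears
  | _, _ => n        -- Python raises IndexError on y[-2] here; excluded by Pre_bears

-- one pass over the three reduction rules (the body of A between `t = n` and `if n == t`)
def bearsStepA (n : Int) : Int :=
  let n1 := if PySem.Int.mod n 5 = 0 then (let temp := n - 42; if 42 ≤ temp then temp else n) else n
  let n2 := if PySem.Int.mod n1 2 = 0 then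
      (let temp := PySem.Int.floordiv n1 2; if 42 ≤ temp then temp else n1) else n1
  if PySem.Int.mod n2 3 = 0 ∨ PySem.Int.mod n2 4 = 0 then bearsDigitA n2 else n2

-- A's self-recursion, with fuel as a totality guard only: whenever A recurses the argument is a
-- strictly smaller value ≥ 42, so `n.natAbs + 1` rounds always suffice.
def bearsGo (fuel : Nat) (n : Int) : Bool :=
  match fuel with
  | 0 => false
  | f + 1 =>
    -- `if n == str(n): raise ValueError` compares an int with a str, hence is always False: no code
    if n = 42 then true
    else
      let n' := bearsStepA n                      -- t = n; the three reductions update n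
      if n' = n then false else bearsGo f n'      -- if n == t: return False / return bears(n)

def bears (n : Int) : Bool := bearsGo (n.natAbs + 1) n

-- ===== PORT B =====
-- one iteration of the while-loop body after the 42 test (t = n; the three reductions)
def bearsStepB (n : Int) : Int :=
  let n1 := if PySem.Int.mod n 5 = 0 ∧ 42 ≤ n - 42 then n - 42 else n
  let n2 := if PySem.Int.mod n1 2 = 0 ∧ 42 ≤ PySem.Int.floordiv n1 2 then PySem.Int.floordiv n1 2 else n1
  if PySem.Int.mod n2 3 = 0 ∨ PySem.Int.mod n2 4 = 0 then
    let z := PySem.Int.mod n2 10 * PySem.Int.mod (PySem.Int.floordiv n2 10) 10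
    if 42 ≤ n2 - z then n2 - z else n2
  else n2

-- the while-True loop, with the same fuel bound as a totality guard
def bearsLoop (fuel : Nat) (n : Int) : Bool :=
  match fuel with
  | 0 => false
  | f + 1 =>
    if n = 42 then true
    else
      let n' := bearsStepB n
      if n' = n then false else bearsLoop f n'

def bears_alt (n : Int) : Bool := bearsLoop (n.natAbs + 1) n

-- ===== PRECONDITION & SPEC =====
-- Pre_ excludes exactly the single-digit inputs divisible by 3 or 4, on which A raises
-- (IndexError on y[-2] for 0..9, ValueError from int('-') for -9..-1) and returns nothing.
def Pre_bears (n : Int) : Prop :=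
  ¬ ((PySem.Int.mod n 3 = 0 ∨ PySem.Int.mod n 4 = 0) ∧ -9 ≤ n ∧ n ≤ 9)
instance (n : Int) : Decidable (Pre_bears n) := by unfold Pre_bears; infer_instance

def pvWitness_bears : Int := (7)

def Spec_bears (n : Int) (out : Bool) : Prop := out = bears_alt n
instance (n : Int) (out : Bool) : Decidable (Spec_bears n out) := by unfold Spec_bears; infer_instance

-- ===== CLAIM (what is proved, stated in full; the proofs are below) =====
def Claim_equal_bears : Prop := ∀ (n : Int), Dom_bears n → Pre_bears n → Spec_bears n (bears n)

-- ===== LEMMAS AND PROOFS =====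

-- the decimal digits of a natural number, most significant first (spec for Nat.toDigits 10)
def digitsAux (n : Nat) : List Char :=
  if n < 10 then [Nat.digitChar n] else digitsAux (n / 10) ++ [Nat.digitChar (n % 10)]
  decreasing_by exact Nat.div_lt_self (by omega) (by norm_num)

theorem toDigitsCore_eq_digitsAux (f : Nat) :
    ∀ (n : Nat) (l : List Char), n < f → Nat.toDigitsCore 10 f n l = digitsAux n ++ l := by
  induction f with
  | zero => intro n l h; omega
  | succ f ih =>
    intro n l h
    rw [Nat.toDigitsCore, digitsAux]
    by_cases h10 : n < 10
    · rw [if_pos (by omega : n / 10 = 0), if_pos h10, Nat.mod_eq_of_lt h10]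
      rfl
    · rw [if_neg (by omega : ¬ n / 10 = 0), if_neg h10,
        ih (n / 10) _ (by have := Nat.div_lt_self (by omega : 0 < n) (by norm_num : 1 < 10); omega),
        List.append_assoc]
      rfl

theorem toChars_nonneg (n : Int) (h : 0 ≤ n) : PySem.Int.toChars n = digitsAux n.toNat := by
  rw [PySem.Int.toChars, if_neg (by omega), Nat.toDigits,
    toDigitsCore_eq_digitsAux _ _ _ (Nat.lt_succ_self _), List.append_nil]

theorem toChars_neg (n : Int) (h : n < 0) : PySem.Int.toChars n = '-' :: digitsAux n.natAbs := by
  rw [PySem.Int.toChars, if_pos h, Nat.toDigits,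
    toDigitsCore_eq_digitsAux _ _ _ (Nat.lt_succ_self _), List.append_nil]

theorem digitsAux_last (n : Nat) : ∃ pre, digitsAux n = pre ++ [Nat.digitChar (n % 10)] := by
  by_cases h : n < 10
  · exact ⟨[], by rw [digitsAux, if_pos h, Nat.mod_eq_of_lt h]; rfl⟩
  · exact ⟨digitsAux (n / 10), by rw [digitsAux, if_neg h]⟩

theorem digit_pair (m : Nat) (h : 10 ≤ m) :
    ∃ pre, digitsAux m = pre ++ [Nat.digitChar (m / 10 % 10), Nat.digitChar (m % 10)] := by
  obtain ⟨pre, hpre⟩ := digitsAux_last (m / 10)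
  refine ⟨pre, ?_⟩
  rw [digitsAux, if_neg (by omega), hpre, List.append_assoc]
  rfl

theorem pyIdx_neg1 (L : Nat) : PySem.List.pyIdx? (L + 2) (-1) = some (L + 1) := by
  rw [PySem.List.pyIdx?, if_neg (by omega), if_pos (by push_cast; omega)]
  simp only [Option.some.injEq]
  omega

theorem pyIdx_neg2 (L : Nat) : PySem.List.pyIdx? (L + 2) (-2) = some L := by
  rw [PySem.List.pyIdx?, if_neg (by omega), if_pos (by push_cast; omega)]
  simp only [Option.some.injEq]
  omega

theorem pyGet_last2 {α : Type} (l : List α) (a b : α) :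
    PySem.List.pyGet? (l ++ [a, b]) (-1) = some b ∧
      PySem.List.pyGet? (l ++ [a, b]) (-2) = some a := by
  have hlen : (l ++ [a, b]).length = l.length + 2 := by simp
  constructor
  · rw [PySem.List.pyGet?, hlen, pyIdx_neg1, Option.bind_some,
      List.getElem?_append_right (by omega)]
    simp
  · rw [PySem.List.pyGet?, hlen, pyIdx_neg2, Option.bind_some,
      List.getElem?_append_right (by omega)]
    simp

theorem ofChars_digitChar (k : Nat) (h : k < 10) :
    PySem.Int.ofChars? [Nat.digitChar k] = some (k : Int) := by
  interval_cases k <;> decide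

theorem digitA_bound (n : Int) : bearsDigitA n = n ∨ 42 ≤ bearsDigitA n := by
  rw [bearsDigitA]
  split
  all_goals try exact Or.inl rfl
  split
  all_goals try exact Or.inl rfl
  dsimp only
  split_ifs <;> omega

theorem stepA_bound (n : Int) : bearsStepA n = n ∨ 42 ≤ bearsStepA n := by
  simp only [bearsStepA]
  set n1 := if PySem.Int.mod n 5 = 0 then (if 42 ≤ n - 42 then n - 42 else n) else n with hn1
  set n2 := if PySem.Int.mod n1 2 = 0 then
      (if 42 ≤ PySem.Int.floordiv n1 2 then PySem.Int.floordiv n1 2 else n1) else n1 with hn2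
  have h1 : n1 = n ∨ 42 ≤ n1 := by rw [hn1]; split_ifs <;> omega
  have h2 : n2 = n1 ∨ 42 ≤ n2 := by rw [hn2]; split_ifs <;> omega
  rcases digitA_bound n2 with h3 | h3 <;> split_ifs <;> omega

theorem digit_eq (m : Int) (hm : 10 ≤ m ∨ m ≤ -10) :
    bearsDigitA m =
      if 42 ≤ m - m % 10 * (m / 10 % 10) then m - m % 10 * (m / 10 % 10) else m := by
  rcases hm with hm | hm
  · -- positive, at least two digits: the string digits are exactly m % 10 and m / 10 % 10
    obtain ⟨pre, hpre⟩ := digit_pair m.toNat (by omega)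
    rw [bearsDigitA, toChars_nonneg m (by omega), hpre,
      (pyGet_last2 pre _ _).1, (pyGet_last2 pre _ _).2]
    dsimp only
    rw [ofChars_digitChar _ (Nat.mod_lt _ (by norm_num)),
      ofChars_digitChar _ (Nat.mod_lt _ (by norm_num))]
    dsimp only
    have e1 : ((m.toNat % 10 : Nat) : Int) = m % 10 := by omega
    have e2 : ((m.toNat / 10 % 10 : Nat) : Int) = m / 10 % 10 := by omega
    rw [e1, e2]
  · -- negative: both digit products are nonnegative, so neither side changes m
    obtain ⟨pre, hpre⟩ := digit_pair m.natAbs (by omega)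
    rw [bearsDigitA, toChars_neg m (by omega), hpre, ← List.cons_append,
      (pyGet_last2 ('-' :: pre) _ _).1, (pyGet_last2 ('-' :: pre) _ _).2]
    dsimp only
    rw [ofChars_digitChar _ (Nat.mod_lt _ (by norm_num)),
      ofChars_digitChar _ (Nat.mod_lt _ (by norm_num))]
    dsimp only
    have hzA : (0 : Int) ≤ ((m.natAbs % 10 : Nat) : Int) * ((m.natAbs / 10 % 10 : Nat) : Int) :=
      mul_nonneg (by positivity) (by positivity)
    have hzB : (0 : Int) ≤ m % 10 * (m / 10 % 10) :=
      mul_nonneg (by omega) (by omega)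
    split_ifs <;> first | rfl | linarith

theorem step_eq (n : Int) (h : 42 ≤ n ∨ Pre_bears n) : bearsStepA n = bearsStepB n := by
  have m2 : ∀ a : Int, PySem.Int.mod a 2 = a % 2 := fun a => PySem.Int.mod_eq_emod_of_pos (by norm_num)
  have m3 : ∀ a : Int, PySem.Int.mod a 3 = a % 3 := fun a => PySem.Int.mod_eq_emod_of_pos (by norm_num)
  have m4 : ∀ a : Int, PySem.Int.mod a 4 = a % 4 := fun a => PySem.Int.mod_eq_emod_of_pos (by norm_num)
  have m5 : ∀ a : Int, PySem.Int.mod a 5 = a % 5 := fun a => PySem.Int.mod_eq_emod_of_pos (by norm_num)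
  have m10 : ∀ a : Int, PySem.Int.mod a 10 = a % 10 := fun a => PySem.Int.mod_eq_emod_of_pos (by norm_num)
  have f2 : ∀ a : Int, PySem.Int.floordiv a 2 = a / 2 := fun a => PySem.Int.floordiv_eq_ediv_of_pos (by norm_num)
  have f10 : ∀ a : Int, PySem.Int.floordiv a 10 = a / 10 := fun a => PySem.Int.floordiv_eq_ediv_of_pos (by norm_num)
  rw [bearsStepA, bearsStepB]
  simp only [m2, m3, m4, m5, m10, f2, f10]
  -- the first two reductions produce the same value n2 on both sides
  have halign :
      (if n % 5 = 0 then (if 42 ≤ n - 42 then n - 42 else n) else n) =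
        (if n % 5 = 0 ∧ 42 ≤ n - 42 then n - 42 else n) := by split_ifs <;> omega
  rw [halign]
  set n1 := if n % 5 = 0 ∧ 42 ≤ n - 42 then n - 42 else n with hn1
  have halign2 :
      (if n1 % 2 = 0 then (if 42 ≤ n1 / 2 then n1 / 2 else n1) else n1) =
        (if n1 % 2 = 0 ∧ 42 ≤ n1 / 2 then n1 / 2 else n1) := by split_ifs <;> omega
  rw [halign2]
  set m := if n1 % 2 = 0 ∧ 42 ≤ n1 / 2 then n1 / 2 else n1 with hmdef
  -- m is either ≥ 42 (it was updated, or n itself is large) or equals the original n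
  have hm : m = n ∨ 42 ≤ m := by
    rcases h with h | _
    · right
      have h1 : 42 ≤ n1 := by rw [hn1]; split_ifs <;> omega
      rw [hmdef]; split_ifs <;> omega
    · have h1 : n1 = n ∨ 42 ≤ n1 := by rw [hn1]; split_ifs <;> omega
      rw [hmdef]; split_ifs <;> omega
  by_cases hg : m % 3 = 0 ∨ m % 4 = 0
  · rw [if_pos hg, if_pos hg]
    have hsize : 10 ≤ m ∨ m ≤ -10 := by
      rcases hm with hm' | hm'
      · rcases h with h | hp
        · omega
        · rw [Pre_bears] at hp
          simp only [m3, m4] at hp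
          rw [hm'] at hg
          omega
      · omega
    exact digit_eq m hsize
  · rw [if_neg hg, if_neg hg]

theorem go_eq (f : Nat) : ∀ (n : Int), 42 ≤ n ∨ Pre_bears n → bearsGo f n = bearsLoop f n := by
  induction f with
  | zero => intro n _; rfl
  | succ f ih =>
    intro n h
    rw [bearsGo, bearsLoop]
    by_cases h42 : n = 42
    · rw [if_pos h42, if_pos h42]
    · rw [if_neg h42, if_neg h42]
      simp only [← step_eq n h]
      by_cases hfix : bearsStepA n = n
      · rw [if_pos hfix, if_pos hfix]
      · rw [if_neg hfix, if_neg hfix]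
        exact ih _ (Or.inl ((stepA_bound n).resolve_left hfix))

-- ===== VERDICT (by name: the statement is the Claim_ definition above) =====
theorem bears_spec : Claim_equal_bears := by
  intro n _ hpre
  unfold Spec_bears bears bears_alt
  exact go_eq _ n (Or.inr hpre)
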